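-- pv_equiv track=rewrite | github.com/hed-standard/hed-python | hed/models/hed_string.py | split_hed_string
-- ===== SOURCE A (Python) =====
-- def split_hed_string(hed_string) -> list[tuple[bool, tuple[int, int]]]:
--     """ Split a HED string into delimiters and tags.
--
--     Parameters:
--         hed_string (str): The HED string to split.
--
--     Returns:
--         list[tuple[bool, tuple[int, int]]]:  A list of tuples where each tuple is (is_hed_tag, (start_pos, end_pos)).
--
--     Notes:
--         - The tuple format is as follows
--             - is_hed_tag (bool): A (possible) HED tag if True, delimiter if not.
--             - start_pos (int):   Index of start of string in hed_string.
--             - end_pos (int):     Index of end of string in hed_string.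
--
--         - This function does not validate tags or delimiters in any form.
--
--     """
--     tag_delimiters = ",()"
--     current_spacing = 0
--     found_symbol = True
--     result_positions = []
--     tag_start_pos = None
--     last_end_pos = 0
--     for i, char in enumerate(hed_string):
--         if char == " ":
--             current_spacing += 1
--             continue
--
--         if char in tag_delimiters:
--             if found_symbol:
--                 if last_end_pos != i:
--                     result_positions.append((False, (last_end_pos, i)))
--                 last_end_pos = i
--             elif not found_symbol:
--                 found_symbol = True
--                 last_end_pos = i - current_spacing
--                 result_positions.append((True, (tag_start_pos, last_end_pos)))
--                 current_spacing = 0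
--                 tag_start_pos = None
--             continue
--
--         # If we have a current delimiter, end it here.
--         if found_symbol and last_end_pos is not None:
--             if last_end_pos != i:
--                 result_positions.append((False, (last_end_pos, i)))
--             last_end_pos = None
--
--         found_symbol = False
--         current_spacing = 0
--         if tag_start_pos is None:
--             tag_start_pos = i
--
--     if last_end_pos is not None and len(hed_string) != last_end_pos:
--         result_positions.append((False, (last_end_pos, len(hed_string))))
--     if tag_start_pos is not None:
--         result_positions.append((True, (tag_start_pos, len(hed_string) - current_spacing)))
--         if current_spacing:
--             result_positions.append((False, (len(hed_string) - current_spacing, len(hed_string))))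
--
--     return result_positions
-- ===== SOURCE B (Python) =====
-- def _tokens(hed_string):
--     """One-pass lexer: (i, i) for each delimiter char, (a, b) with a < b for each
--     maximal non-delimiter run trimmed of leading/trailing spaces (dropped if empty)."""
--     delims = ',()'
--     toks = []
--     n = len(hed_string)
--     i = 0
--     while i < n:
--         if hed_string[i] in delims:
--             toks.append((i, i))
--             i += 1
--         else:
--             j = i
--             while j < n and hed_string[j] not in delims:
--                 j += 1
--             a = i
--             while a < j and hed_string[a] == ' ':
--                 a += 1
--             b = j
--             while b > a and hed_string[b - 1] == ' ':
--                 b -= 1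
--             if a < b:
--                 toks.append((a, b))
--             i = j
--     return toks
--
--
-- def split_hed_string(hed_string):
--     result = []
--     cut = 0
--     skip = False
--     for a, b in _tokens(hed_string):
--         if a == b:  # a single delimiter character at position a
--             if skip:
--                 skip = False
--             else:
--                 if cut != a:
--                     result.append((False, (cut, a)))
--                 cut = a
--         else:  # a tag core [a, b)
--             if cut != a:
--                 result.append((False, (cut, a)))
--             result.append((True, (a, b)))
--             cut = b
--             skip = True
--     n = len(hed_string)
--     if cut != n:
--         result.append((False, (cut, n)))
--     return result
-- ===== Notes on version B (the rewrite author's own statement) =====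
-- stated objective: alternative
-- what changed: Replaces A's single interleaved character-level state machine (spacing/found_symbol/tag_start/last_end state) with a two-phase lexer: first tokenize the string into delimiter positions and trimmed tag spans, then fold the token list into (is_tag, span) pieces.
import Mathlib
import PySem

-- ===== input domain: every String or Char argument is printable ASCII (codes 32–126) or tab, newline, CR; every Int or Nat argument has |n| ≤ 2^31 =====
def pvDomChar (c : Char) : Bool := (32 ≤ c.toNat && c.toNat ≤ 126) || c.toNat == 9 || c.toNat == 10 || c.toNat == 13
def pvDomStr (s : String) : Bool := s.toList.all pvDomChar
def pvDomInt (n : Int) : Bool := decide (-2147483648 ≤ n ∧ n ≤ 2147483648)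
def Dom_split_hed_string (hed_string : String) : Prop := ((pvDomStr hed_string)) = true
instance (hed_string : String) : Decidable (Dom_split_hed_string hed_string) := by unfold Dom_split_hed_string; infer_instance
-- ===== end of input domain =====

-- B replaces A's interleaved character-level state machine by a two-phase lexer
-- (tokenize into delimiter positions and trimmed tag spans, then fold the tokens
-- into pieces); same cost, different decomposition (objective: alternative).

def pvDelims : List Char := [',', '(', ')']

-- ===== PORT A =====
-- literal transliteration of A's for-loop (state: spacing, found_symbol, result,
-- tag_start_pos, last_end_pos); the two post-loop ifs live in the [] base case,
-- where i = len(hed_string).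
def loopA : List Char → Int → Int → Bool → List (Bool × (Int × Int)) →
    Option Int → Option Int → List (Bool × (Int × Int))
  | [], i, spacing, _found, res, tsp, lep =>
    let res1 := match lep with
      | some p => if i ≠ p then res ++ [(false, (p, i))] else res
      | none => res
    (match tsp with
     | some t =>
        let res2 := res1 ++ [(true, (t, i - spacing))]
        if spacing ≠ 0 then res2 ++ [(false, (i - spacing, i))] else res2
     | none => res1)
  | c :: rest, i, spacing, found, res, tsp, lep =>
    if c = ' ' then loopA rest (i+1) (spacing+1) found res tsp lep
    else if c ∈ pvDelims then
      (if found then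
        loopA rest (i+1) spacing found
          (if lep ≠ some i then res ++ [(false, (lep.getD 0, i))] else res) tsp (some i)
      else
        loopA rest (i+1) 0 true
          (res ++ [(true, (tsp.getD 0, i - spacing))]) none (some (i - spacing)))
    else
      let res2 := if found && lep.isSome then
          (if lep ≠ some i then res ++ [(false, (lep.getD 0, i))] else res) else res
      let lep2 := if found && lep.isSome then none else lep
      let tsp2 := if tsp = none then some i else tsp
      loopA rest (i+1) 0 false res2 tsp2 lep2

def split_hed_string (hed_string : String) : List (Bool × (Int × Int)) :=
  loopA hed_string.toList 0 0 true [] none (some 0)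

-- ===== PORT B =====
-- phase 1 of Source B: one-pass lexer; (i,i) for a delimiter char, (a,b) with a < b
-- for a maximal non-delimiter run trimmed of spaces (while-loops → takeWhile/dropWhile)
def pvTokens : List Char → Int → List (Int × Int)
  | [], _ => []
  | c :: rest, i =>
    if c ∈ pvDelims then (i, i) :: pvTokens rest (i+1)
    else
      let run := (c :: rest).takeWhile (fun ch => ch ∉ pvDelims)
      let a := i + ((run.takeWhile (fun ch => ch = ' ')).length : Int)
      let core := run.dropWhile (fun ch => ch = ' ')
      let core2 := (core.reverse.dropWhile (fun ch => ch = ' ')).reverse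
      let b := a + (core2.length : Int)
      (if core2 ≠ [] then [(a, b)] else []) ++
        pvTokens (rest.drop (run.length - 1)) (i + run.length)
  termination_by l _ => l.length
  decreasing_by
    all_goals simp only [List.length_cons, List.length_drop]
    all_goals omega

-- phase 2 of Source B: fold the tokens into pieces (state: result, cut, skip)
def emitTok (st : List (Bool × (Int × Int)) × Int × Bool) (tok : Int × Int) :
    List (Bool × (Int × Int)) × Int × Bool :=
  match st, tok with
  | (res, cut, skip), (a, b) =>
    if a = b then
      (if skip then (res, cut, false)
       else ((if cut ≠ a then res ++ [(false, (cut, a))] else res), a, false))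
    else
      ((if cut ≠ a then res ++ [(false, (cut, a))] else res) ++ [(true, (a, b))], b, true)

def split_hed_string_alt (hed_string : String) : List (Bool × (Int × Int)) :=
  let l := hed_string.toList
  let n : Int := l.length
  let st := (pvTokens l 0).foldl emitTok ([], 0, false)
  if st.2.1 ≠ n then st.1 ++ [(false, (st.2.1, n))] else st.1

-- ===== PRECONDITION & SPEC =====
def Spec_split_hed_string (hed_string : String) (out : List (Bool × (Int × Int))) : Prop := out = split_hed_string_alt hed_string
instance (hed_string : String) (out : List (Bool × (Int × Int))) : Decidable (Spec_split_hed_string hed_string out) := by unfold Spec_split_hed_string; infer_instance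

-- ===== CLAIM (what is proved, stated in full; the proofs are below) =====
def Claim_equal_split_hed_string : Prop := ∀ (hed_string : String), Dom_split_hed_string hed_string → Spec_split_hed_string hed_string (split_hed_string hed_string)

-- ===== LEMMAS AND PROOFS =====

-- B's finishing step, as a function of the fold state
def finishB (st : List (Bool × (Int × Int)) × Int × Bool) (n : Int) :
    List (Bool × (Int × Int)) :=
  if st.2.1 ≠ n then st.1 ++ [(false, (st.2.1, n))] else st.1

-- spacing after A walks a delimiter-free run in tag state
def spAfter (sp : Int) (cs : List Char) : Int :=
  if cs.all (fun ch => ch = ' ') then sp + cs.length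
  else ((cs.reverse.takeWhile (fun ch => ch = ' ')).length : Int)

theorem takeWhile_append_of_all {α : Type} (p : α → Bool) (l₁ l₂ : List α)
    (h : l₁.all p) : (l₁ ++ l₂).takeWhile p = l₁ ++ l₂.takeWhile p := by
  induction l₁ with
  | nil => simp
  | cons a t ih =>
    simp only [List.all_cons, Bool.and_eq_true] at h
    simp [List.takeWhile_cons, h.1, ih h.2]

theorem takeWhile_append_of_not_all {α : Type} (p : α → Bool) (l₁ l₂ : List α)
    (h : ¬ l₁.all p) : (l₁ ++ l₂).takeWhile p = l₁.takeWhile p := by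
  induction l₁ with
  | nil => simp at h
  | cons a t ih =>
    by_cases hp : p a
    · simp only [List.all_cons, hp, Bool.true_and] at h
      simp [List.takeWhile_cons, hp, ih h]
    · simp [List.takeWhile_cons, hp]

theorem dropWhile_head_not {α : Type} (p : α → Bool) (l : List α) (a : α) (t : List α)
    (h : l.dropWhile p = a :: t) : p a = false := by
  induction l with
  | nil => simp at h
  | cons x xs ih =>
    by_cases hp : p x
    · simp only [List.dropWhile_cons, hp, if_true] at h; exact ih h
    · simp only [List.dropWhile_cons, hp, if_false] at h
      cases h; simpa using hp

theorem drop_length_takeWhile {α : Type} (p : α → Bool) (l : List α) :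
    l.drop (l.takeWhile p).length = l.dropWhile p := by
  induction l with
  | nil => simp
  | cons a t ih =>
    by_cases hp : p a
    · simp [List.takeWhile_cons, List.dropWhile_cons, hp, ih]
    · simp [List.takeWhile_cons, List.dropWhile_cons, hp]

-- walking a run of spaces leaves everything but i and spacing unchanged
theorem spacesWalk (cs : List Char) (h : ∀ c ∈ cs, c = ' ') :
    ∀ (rest : List Char) (i sp : Int) (found : Bool) res tsp lep,
      loopA (cs ++ rest) i sp found res tsp lep
        = loopA rest (i + cs.length) (sp + cs.length) found res tsp lep := by
  induction cs with
  | nil => intro rest i sp found res tsp lep; simp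
  | cons c t ih =>
    intro rest i sp found res tsp lep
    have hc : c = ' ' := h c (by simp)
    have ht : ∀ c ∈ t, c = ' ' := fun x hx => h x (by simp [hx])
    simp only [List.cons_append, loopA, hc, if_true, ih ht]
    congr 1 <;> (push_cast [List.length_cons]; ring)

-- walking a delimiter-free suffix of a run while inside a tag
theorem tagWalk (cs : List Char) (h : ∀ c ∈ cs, c ∉ pvDelims) :
    ∀ (rest : List Char) (i sp t : Int) res,
      loopA (cs ++ rest) i sp false res (some t) none
        = loopA rest (i + cs.length) (spAfter sp cs) false res (some t) none := by
  induction cs with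
  | nil => intro rest i sp t res; simp [spAfter]
  | cons c cs' ih =>
    intro rest i sp t res
    have hc : c ∉ pvDelims := h c (by simp)
    have hcs : ∀ x ∈ cs', x ∉ pvDelims := fun x hx => h x (by simp [hx])
    have harith : ∀ j : Int, j + 1 + (cs'.length : Int) = j + ((cs'.length + 1 : Nat) : Int) := by
      intro j; push_cast; ring
    by_cases hsp : c = ' '
    · simp only [List.cons_append, loopA, hsp, if_true, ih hcs]
      rw [show (' ' :: cs').length = cs'.length + 1 from rfl]
      rw [← harith i]
      congr 1
      by_cases hall : cs'.all (fun ch => ch = ' ')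
      · simp only [spAfter, List.all_cons, hall, decide_true, Bool.true_and, if_true]
        push_cast [List.length_cons]; ring
      · have hall2 : ¬ (' ' :: cs').all (fun ch => ch = ' ') := by
          simp only [List.all_cons, Bool.and_eq_true] at *
          intro hh; exact hall hh.2
        simp only [spAfter, if_neg hall, if_neg hall2, List.reverse_cons]
        rw [takeWhile_append_of_not_all _ _ _ (by
          intro hcon
          exact hall (by simpa [List.all_eq_true] using
            (by simpa [List.all_eq_true] using hcon : ∀ x ∈ cs'.reverse, decide (x = ' ') = true)))]
    · -- non-space, non-delimiter: tag continues, spacing resets to 0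
      simp only [List.cons_append, loopA, hsp, if_false, if_neg hc]
      simp only [Option.isSome_none, Bool.and_false, Bool.false_eq_true, if_false,
        reduceCtorEq]
      rw [ih hcs]
      rw [show (c :: cs').length = cs'.length + 1 from rfl, ← harith i]
      congr 1
      have hnotall : ¬ (c :: cs').all (fun ch => ch = ' ') := by
        simp [List.all_cons, hsp]
      by_cases hall : cs'.all (fun ch => ch = ' ')
      · simp only [spAfter, if_pos hall, if_neg hnotall, List.reverse_cons]
        rw [takeWhile_append_of_all _ _ _ (by
            simpa [List.all_eq_true] using (by simpa [List.all_eq_true] using hall :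
              ∀ x ∈ cs', decide (x = ' ') = true))]
        simp [List.takeWhile_cons, hsp]
      · simp only [spAfter, if_neg hall, if_neg hnotall, List.reverse_cons]
        rw [takeWhile_append_of_not_all _ _ _ (by
          intro hcon
          exact hall (by simpa [List.all_eq_true] using
            (by simpa [List.all_eq_true] using hcon : ∀ x ∈ cs'.reverse, decide (x = ' ') = true)))]

theorem dropWhile_append_of_all {α : Type} (p : α → Bool) (l₁ l₂ : List α)
    (h : l₁.all p) : (l₁ ++ l₂).dropWhile p = l₂.dropWhile p := by
  induction l₁ with
  | nil => simp
  | cons a t ih =>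
    simp only [List.all_cons, Bool.and_eq_true] at h
    simp [List.dropWhile_cons, h.1, ih h.2]

theorem dropWhile_append_of_not_all {α : Type} (p : α → Bool) (l₁ l₂ : List α)
    (h : ¬ l₁.all p) : (l₁ ++ l₂).dropWhile p = l₁.dropWhile p ++ l₂ := by
  induction l₁ with
  | nil => simp at h
  | cons a t ih =>
    by_cases hp : p a
    · simp only [List.all_cons, hp, Bool.true_and] at h
      simp [List.dropWhile_cons, hp, ih h]
    · simp [List.dropWhile_cons, hp]

-- A's spacing at the end of a tag run equals the length of the trailing spaces
theorem spAfter_core (d : Char) (core' : List Char) (hd : ¬ d = ' ') :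
    spAfter 0 core'
      = ((d :: core').length : Int)
        - ((((d :: core').reverse.dropWhile (fun ch => ch = ' ')).reverse.length : Nat) : Int) := by
  by_cases hall : core'.all (fun ch => decide (ch = ' '))
  · have h1 : (d :: core').reverse.dropWhile (fun ch => ch = ' ') = [d] := by
      rw [List.reverse_cons, dropWhile_append_of_all _ _ _ (by simpa using hall)]
      simp [List.dropWhile_cons, hd]
    rw [h1]
    simp [spAfter, hall]
  · have h1 : (d :: core').reverse.dropWhile (fun ch => ch = ' ')
        = core'.reverse.dropWhile (fun ch => ch = ' ') ++ [d] := by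
      rw [List.reverse_cons, dropWhile_append_of_not_all _ _ _ (by simpa using hall)]
    rw [h1]
    simp only [spAfter, if_neg hall]
    have h2 : core'.reverse.dropWhile (fun ch => decide (ch = ' '))
        = core'.reverse.drop (core'.reverse.takeWhile (fun ch => decide (ch = ' '))).length :=
      (drop_length_takeWhile _ _).symm
    have h3 : (core'.reverse.takeWhile (fun ch => decide (ch = ' '))).length ≤ core'.length := by
      have := List.IsPrefix.length_le
        (List.takeWhile_prefix (fun ch => decide (ch = ' ')) (l := core'.reverse))
      simpa using this
    simp only [List.length_append, List.length_reverse, h2, List.length_drop,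
      List.length_reverse, List.length_cons, List.length_nil]
    push_cast
    omega

theorem core2_ne_nil (d : Char) (core' : List Char) (hd : ¬ d = ' ') :
    ((d :: core').reverse.dropWhile (fun ch => ch = ' ')).reverse ≠ [] := by
  intro h
  have h2 : (d :: core').reverse.dropWhile (fun ch => ch = ' ') = [] := by
    simpa using congrArg List.reverse h
  rw [List.dropWhile_eq_nil_iff] at h2
  exact hd (by simpa using h2 d (by simp))

theorem L1base (i sp : Int) (res : List (Bool × (Int × Int))) (p : Int) :
    loopA [] i sp true res none (some p)
      = finishB ((pvTokens [] i).foldl emitTok (res, p, false)) (i + (([] : List Char).length : Int)) := by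
  by_cases hpi : p = i
  · subst hpi; simp [loopA, pvTokens, finishB]
  · simp [loopA, pvTokens, finishB, hpi, (Ne.symm hpi : ¬ i = p)]

theorem pvTokens_cons_delim (e : Char) (rest : List Char) (i : Int) (h : e ∈ pvDelims) :
    pvTokens (e :: rest) i = (i, i) :: pvTokens rest (i + 1) := by
  rw [pvTokens.eq_def]
  simp [h]

theorem mainL1 : ∀ (N : Nat) (l : List Char), l.length ≤ N →
    ∀ (i sp : Int) res (p : Int),
      loopA l i sp true res none (some p)
        = finishB ((pvTokens l i).foldl emitTok (res, p, false)) (i + l.length) := by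
  intro N
  induction N with
  | zero =>
    intro l hl i sp res p
    have hnil : l = [] := List.eq_nil_of_length_eq_zero (by omega)
    subst hnil; exact L1base i sp res p
  | succ N ihN =>
    intro l hl i sp res p
    match l with
    | [] => exact L1base i sp res p
    | c :: rest =>
      by_cases hcdel : c ∈ pvDelims
      · -- a delimiter character: both sides cut here and continue
        have hcsp : ¬ c = ' ' := by
          intro h; subst h; simp [pvDelims] at hcdel
        have hrest : rest.length ≤ N := by
          simp only [List.length_cons] at hl; omega
        have harith : i + 1 + (rest.length : Int) = i + ((c :: rest).length : Int) := by
          push_cast [List.length_cons]; ring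
        simp only [loopA, if_neg hcsp, if_pos hcdel, if_pos rfl]
        rw [ihN rest hrest, harith]
        simp only [pvTokens, if_pos hcdel, List.foldl_cons, emitTok]
        simp [ne_eq]
      · -- a non-delimiter character: peel the whole maximal run at once
        have hNrest : rest.length ≤ N := by simpa using hl
        have hq : (fun ch => decide (ch ∉ pvDelims)) c = true := by simpa using hcdel
        have hruncons : (c :: rest).takeWhile (fun ch => ch ∉ pvDelims)
            = c :: rest.takeWhile (fun ch => ch ∉ pvDelims) := by
          simp [List.takeWhile_cons, hcdel]
        have hsplit : ((c :: rest).takeWhile (fun ch => ch ∉ pvDelims))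
            ++ ((c :: rest).dropWhile (fun ch => ch ∉ pvDelims)) = c :: rest :=
          List.takeWhile_append_dropWhile
        have hrest' : (c :: rest).dropWhile (fun ch => ch ∉ pvDelims)
            = rest.drop (((c :: rest).takeWhile (fun ch => ch ∉ pvDelims)).length - 1) := by
          rw [hruncons]
          simp only [List.length_cons, Nat.add_sub_cancel]
          rw [drop_length_takeWhile]
          simp [List.dropWhile_cons, hcdel]
        -- abbreviations
        set run := (c :: rest).takeWhile (fun ch => ch ∉ pvDelims) with hrun
        set rest' := (c :: rest).dropWhile (fun ch => ch ∉ pvDelims) with hrestdef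
        set lead := run.takeWhile (fun ch => ch = ' ') with hlead
        set core := run.dropWhile (fun ch => ch = ' ') with hcoredef
        set core2 := (core.reverse.dropWhile (fun ch => ch = ' ')).reverse with hcore2def
        have hallrun : ∀ x ∈ run, ¬ x ∈ pvDelims := by
          intro x hx; simpa using List.mem_takeWhile_imp hx
        have hleads : ∀ x ∈ lead, x = ' ' := by
          intro x hx; simpa using List.mem_takeWhile_imp hx
        have hleadcore : lead ++ core = run := List.takeWhile_append_dropWhile
        have hrunlen : 1 ≤ run.length := by rw [hruncons]; simp
        have hrestlen : rest'.length ≤ rest.length := by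
          rw [hrest']; simp [List.length_drop]
        have htok : pvTokens (c :: rest) i
            = (if core2 ≠ [] then [(i + (lead.length : Int),
                  i + (lead.length : Int) + (core2.length : Int))] else [])
              ++ pvTokens rest' (i + (run.length : Int)) := by
          rw [pvTokens.eq_def]
          simp only [if_neg hcdel, ← hrun, ← hlead, ← hcoredef, ← hcore2def]
          rw [← hrest', hrestdef]
        have hlsplit : c :: rest = lead ++ (core ++ rest') := by
          rw [← List.append_assoc, hleadcore, hsplit]
        have hlenrun : run.length = lead.length + core.length := by
          rw [← hleadcore]; simp
        have hlen : (c :: rest).length = run.length + rest'.length := by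
          rw [← hsplit]; simp
        clear_value core2 core lead rest' run
        conv_lhs => rw [hlsplit, spacesWalk lead hleads]
        rcases core with _ | ⟨d, core'⟩
        · -- the whole run is spaces: no token, state unchanged
          have h' := hleadcore
          rw [List.append_nil] at h'
          have hih := ihN rest' (le_trans hrestlen hNrest)
            (i + (lead.length : Int)) (sp + (lead.length : Int)) res p
          simp only [List.nil_append]
          rw [hih, htok, hcore2def]
          simp [← h']
          congr 1
          have hL := hlen
          simp only [List.length_cons] at hL
          have hlr : lead.length = run.length := by rw [h']
          omega
        · have hd : ¬ d = ' ' := by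
            have := dropWhile_head_not (fun ch => decide (ch = ' ')) run d core' hcoredef.symm
            simpa using this
          have hdmem : d ∈ run := by rw [← hleadcore]; simp
          have hddel : ¬ d ∈ pvDelims := hallrun d hdmem
          have hcore'del : ∀ x ∈ core', ¬ x ∈ pvDelims := by
            intro x hx
            exact hallrun x (by rw [← hleadcore]; simp [hx])
          have hc2 : core2 = ((d :: core').reverse.dropWhile (fun ch => ch = ' ')).reverse := by
            rw [hcore2def]
          have hcore2ne : core2 ≠ [] := by rw [hc2]; exact core2_ne_nil d core' hd
          have hcore2len : 1 ≤ core2.length := by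
            cases hc2 : core2 with
            | nil => exact absurd hc2 hcore2ne
            | cons x xs => simp
          have hspa : spAfter 0 core'
              = ((d :: core').length : Int) - ((core2.length : Nat) : Int) := by
            rw [hc2]; exact spAfter_core d core' hd
          -- one step of A at the first tag character d
          simp only [List.cons_append, loopA, if_neg hd, if_neg hddel]
          simp only [Option.isSome_some, Bool.and_self, if_pos rfl, Option.getD_some, ne_eq,
            reduceCtorEq, not_false_eq_true, if_pos trivial, Option.some.injEq, ite_not]
          rw [tagWalk core' hcore'del]
          -- positions
          have hjj : i + (lead.length : Int) + 1 + (core'.length : Int)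
              = i + (run.length : Int) := by
            have h0 : run.length = lead.length + (core'.length + 1) := by
              rw [← hleadcore]; simp
            push_cast [h0]; ring
          rw [hjj]
          rcases rest' with _ | ⟨e, rest''⟩
          ·
            -- the tag runs to the end of the string
            have hn : i + ((c :: rest).length : Int) = i + (run.length : Int) := by
              have h0 : (c :: rest).length = run.length := by simpa using hlen
              rw [h0]
            rw [htok, if_pos hcore2ne]
            simp only [loopA, pvTokens, List.cons_append, List.nil_append, List.foldl_cons,
              List.foldl_nil, hn]
            have hab : ¬ (i + (lead.length : Int) = i + (lead.length : Int) + (core2.length : Int)) := by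
              omega
            simp only [emitTok, if_neg hab, finishB]
            have hbspac : i + (run.length : Int) - spAfter 0 core'
                = i + (lead.length : Int) + (core2.length : Int) := by
              rw [hspa]
              have h0 : run.length = lead.length + (core'.length + 1) := by
                rw [← hleadcore]; simp
              push_cast [h0, List.length_cons]
              ring
            rw [hbspac]
            have hz : spAfter 0 core'
                = i + (run.length : Int) - (i + (lead.length : Int) + (core2.length : Int)) := by
              linarith [hbspac]
            rw [hz]
            by_cases hbj : i + (lead.length : Int) + (core2.length : Int) = i + (run.length : Int)
            · rw [if_neg (show ¬ (i + (run.length : Int)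
                    - (i + (lead.length : Int) + (core2.length : Int)) ≠ 0) by omega),
                  if_neg (show ¬ (i + (lead.length : Int) + (core2.length : Int)
                    ≠ i + (run.length : Int)) by omega)]
              by_cases hpa : p = i + (lead.length : Int) <;> simp [hpa]
            · rw [if_pos (show (i + (run.length : Int)
                    - (i + (lead.length : Int) + (core2.length : Int)) ≠ 0) by omega),
                  if_pos (show (i + (lead.length : Int) + (core2.length : Int)
                    ≠ i + (run.length : Int)) by omega)]
              by_cases hpa : p = i + (lead.length : Int) <;> simp [hpa]
          · have he : e ∈ pvDelims := by
              have := dropWhile_head_not (fun ch => decide (ch ∉ pvDelims)) (c :: rest) e rest''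
                hrestdef.symm
              simpa using this
            have hesp : ¬ e = ' ' := by
              intro h; rw [h] at he; exact absurd he (by decide)
            -- A consumes the delimiter that terminates the tag
            simp only [List.cons_append, loopA, if_neg hesp, if_pos he, Bool.false_eq_true,
              if_false, ite_false, Option.getD_some]
            have hbspac : i + (run.length : Int) - spAfter 0 core'
                = i + (lead.length : Int) + (core2.length : Int) := by
              rw [hspa]
              have h0 : run.length = lead.length + (core'.length + 1) := by
                rw [← hleadcore]; simp
              push_cast [h0, List.length_cons]
              ring
            rw [hbspac]
            have hih := ihN rest'' (by
                have h0 : (c :: rest).length = run.length + (rest''.length + 1) := by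
                  rw [hlen]; simp
                omega)
              (i + (run.length : Int) + 1) 0
              ((if p = i + (lead.length : Int) then res
                  else res ++ [(false, (p, i + (lead.length : Int)))])
                ++ [(true, (i + (lead.length : Int),
                      i + (lead.length : Int) + (core2.length : Int)))])
              (i + (lead.length : Int) + (core2.length : Int))
            have hab : ¬ (i + (lead.length : Int) = i + (lead.length : Int) + (core2.length : Int)) := by
              omega
            rw [hih, htok, if_pos hcore2ne,
              pvTokens_cons_delim e rest'' (i + (run.length : Int)) he]
            simp only [List.cons_append, List.nil_append, List.foldl_cons]
            congr 1
            · congr 1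
              simp [emitTok, hab]
            · have hL := hlen
              simp only [List.length_cons] at hL
              simp only [List.length_cons]
              push_cast
              omega

theorem split_hed_string_spec' (s : String) :
    split_hed_string s = split_hed_string_alt s := by
  have h := mainL1 s.toList.length s.toList le_rfl 0 0 [] 0
  simp only [split_hed_string, split_hed_string_alt, h, finishB, zero_add]

-- ===== VERDICT (by name: the statement is the Claim_ definition above) =====
theorem split_hed_string_spec : Claim_equal_split_hed_string := by
  intro s _
  unfold Spec_split_hed_string
  exact split_hed_string_spec' s
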